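-- pv_equiv track=rewrite | github.com/johnlinp/karaoke.css | karaoke/config.py | _split_parts
-- ===== SOURCE A (Python) =====
-- def _split_parts(lines):
-- 	basic, beats, visions = [], [], []
--
-- 	target = basic
-- 	for line in lines:
-- 		if line.startswith('='):
-- 			if target is basic:
-- 				target = beats
-- 			elif target is beats:
-- 				target = visions
-- 			continue
--
-- 		target.append(line)
--
-- 	return basic, beats, visions
-- ===== SOURCE B (Python) =====
-- def _split_parts(lines):
--     lines = list(lines)
--     i = next((k for k, l in enumerate(lines) if l.startswith('=')), len(lines))
--     basic = lines[:i]
--     rest = lines[i + 1:]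
--     j = next((k for k, l in enumerate(rest) if l.startswith('=')), len(rest))
--     beats = rest[:j]
--     visions = [l for l in rest[j + 1:] if not l.startswith('=')]
--     return basic, beats, visions
-- ===== Notes on version B (the rewrite author's own statement) =====
-- stated objective: alternative
-- what changed: Replaces A's per-line state machine (a 'target' pointer advanced over three accumulator lists) with an index-and-slice decomposition: find the first two '='-delimiter positions, slice the list into the three sections, and filter remaining '=' lines out of the last slice.
import Mathlib
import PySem

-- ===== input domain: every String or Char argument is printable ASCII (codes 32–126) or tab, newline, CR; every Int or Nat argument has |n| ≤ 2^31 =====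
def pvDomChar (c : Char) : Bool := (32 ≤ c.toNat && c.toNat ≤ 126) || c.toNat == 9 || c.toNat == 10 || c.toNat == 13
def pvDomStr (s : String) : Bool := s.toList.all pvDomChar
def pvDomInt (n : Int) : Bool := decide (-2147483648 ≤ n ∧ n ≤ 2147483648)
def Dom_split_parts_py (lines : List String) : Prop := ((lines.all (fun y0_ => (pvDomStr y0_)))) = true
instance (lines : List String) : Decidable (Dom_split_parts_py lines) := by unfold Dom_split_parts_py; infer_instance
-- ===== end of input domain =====

-- B replaces A's one-pass three-way state machine by find-two-delimiters-then-slice; same O(n) cost, return values proved equal.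

-- ===== PORT A =====
-- line.startswith('=')
def pvIsDelim (l : String) : Bool := PySem.Str.startswith l "="

-- the loop body: state = (basic, beats, visions, target) with target 0/1/2
def pvAStep (st : List String × List String × List String × Nat) (line : String) :
    List String × List String × List String × Nat :=
  let (b, be, v, t) := st
  if pvIsDelim line then
    if t = 0 then (b, be, v, 1)
    else if t = 1 then (b, be, v, 2)
    else (b, be, v, t)
  else
    if t = 0 then (b ++ [line], be, v, t)
    else if t = 1 then (b, be ++ [line], v, t)
    else (b, be, v ++ [line], t)

def split_parts_py (lines : List String) : List String × List String × List String :=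
  let r := lines.foldl pvAStep ([], [], [], 0)
  (r.1, r.2.1, r.2.2.1)

-- ===== PORT B =====
def split_parts_py_alt (lines : List String) : List String × List String × List String :=
  let i := lines.findIdx pvIsDelim          -- first delimiter index (length if none)
  let basic := lines.take i
  let rest := lines.drop (i + 1)
  let j := rest.findIdx pvIsDelim
  let beats := rest.take j
  let visions := (rest.drop (j + 1)).filter (fun l => !pvIsDelim l)
  (basic, beats, visions)

-- ===== PRECONDITION & SPEC =====
def Spec_split_parts_py (lines : List String) (out : List String × List String × List String) : Prop := out = split_parts_py_alt lines
instance (lines : List String) (out : List String × List String × List String) : Decidable (Spec_split_parts_py lines out) := by unfold Spec_split_parts_py; infer_instance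

-- ===== CLAIM (what is proved, stated in full; the proofs are below) =====
def Claim_equal_split_parts_py : Prop := ∀ (lines : List String), Dom_split_parts_py lines → Spec_split_parts_py lines (split_parts_py lines)

-- ===== LEMMAS AND PROOFS =====

-- in target state 2, non-delimiter lines are appended to visions, delimiters skipped
theorem pvPhase2 (rest : List String) : ∀ (b be v : List String),
    rest.foldl pvAStep (b, be, v, 2) = (b, be, v ++ rest.filter (fun l => !pvIsDelim l), 2) := by
  induction rest with
  | nil => intro b be v; simp
  | cons h t ih =>
    intro b be v
    by_cases hd : pvIsDelim h = true <;>
      simp [List.foldl_cons, pvAStep, hd, ih]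

-- in target state 1, lines up to the next delimiter go to beats, the remainder is phase 2
theorem pvPhase1 (rest : List String) : ∀ (b be v : List String),
    (rest.foldl pvAStep (b, be, v, 1)).1 = b ∧
    (rest.foldl pvAStep (b, be, v, 1)).2.1 = be ++ rest.take (rest.findIdx pvIsDelim) ∧
    (rest.foldl pvAStep (b, be, v, 1)).2.2.1 =
      v ++ (rest.drop (rest.findIdx pvIsDelim + 1)).filter (fun l => !pvIsDelim l) := by
  induction rest with
  | nil => intro b be v; simp
  | cons h t ih =>
    intro b be v
    by_cases hd : pvIsDelim h = true
    · simp [List.foldl_cons, pvAStep, hd, List.findIdx_cons, pvPhase2]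
    · have := ih b (be ++ [h]) v
      simp [List.foldl_cons, pvAStep, hd, List.findIdx_cons, this]

-- in target state 0, lines up to the first delimiter go to basic, the remainder is phase 1
theorem pvPhase0 (rest : List String) : ∀ (b be v : List String),
    (rest.foldl pvAStep (b, be, v, 0)).1 = b ++ rest.take (rest.findIdx pvIsDelim) ∧
    (rest.foldl pvAStep (b, be, v, 0)).2.1 =
      be ++ (rest.drop (rest.findIdx pvIsDelim + 1)).take
        ((rest.drop (rest.findIdx pvIsDelim + 1)).findIdx pvIsDelim) ∧
    (rest.foldl pvAStep (b, be, v, 0)).2.2.1 =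
      v ++ ((rest.drop (rest.findIdx pvIsDelim + 1)).drop
        ((rest.drop (rest.findIdx pvIsDelim + 1)).findIdx pvIsDelim + 1)).filter
        (fun l => !pvIsDelim l) := by
  induction rest with
  | nil => intro b be v; simp
  | cons h t ih =>
    intro b be v
    by_cases hd : pvIsDelim h = true
    · have := pvPhase1 t b be v
      simp [List.foldl_cons, pvAStep, hd, List.findIdx_cons, this]
    · have := ih (b ++ [h]) be v
      simp [List.foldl_cons, pvAStep, hd, List.findIdx_cons, this]

-- ===== VERDICT (by name: the statement is the Claim_ definition above) =====
theorem split_parts_py_spec : Claim_equal_split_parts_py := by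
  intro lines _
  unfold Spec_split_parts_py split_parts_py split_parts_py_alt
  have h := pvPhase0 lines [] [] []
  simp only [List.nil_append] at h
  exact Prod.ext h.1 (Prod.ext h.2.1 h.2.2)
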